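-- pv_equiv track=rewrite | github.com/MatsushitaEi/Codility_training | lesson1.py | calc
-- ===== SOURCE A (Python) =====
-- def calc(res):
--     count = 0
--     find = 0
--     find_flg = 0
--     for i in res:
--         if (i == 1):
--             if(find_flg == 1):
--                 if(count < find):
--                     count = find
--             find_flg = 1
--             find = 0
--         else:
--             if(find_flg == 1):
--                 find += 1
--     return count
-- ===== SOURCE B (Python) =====
-- def calc(res):
--     ones = [i for i, x in enumerate(res) if x == 1]
--     best = 0
--     for a, b in zip(ones, ones[1:]):
--         if b - a - 1 > best:
--             best = b - a - 1
--     return best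
-- ===== Notes on version B (the rewrite author's own statement) =====
-- stated objective: simpler
-- what changed: Replaced the single stateful accumulator loop (count/find/find_flg) by two passes: collect the indices of the ones, then take the maximum of b-a-1 over consecutive index pairs.
import Mathlib
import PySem

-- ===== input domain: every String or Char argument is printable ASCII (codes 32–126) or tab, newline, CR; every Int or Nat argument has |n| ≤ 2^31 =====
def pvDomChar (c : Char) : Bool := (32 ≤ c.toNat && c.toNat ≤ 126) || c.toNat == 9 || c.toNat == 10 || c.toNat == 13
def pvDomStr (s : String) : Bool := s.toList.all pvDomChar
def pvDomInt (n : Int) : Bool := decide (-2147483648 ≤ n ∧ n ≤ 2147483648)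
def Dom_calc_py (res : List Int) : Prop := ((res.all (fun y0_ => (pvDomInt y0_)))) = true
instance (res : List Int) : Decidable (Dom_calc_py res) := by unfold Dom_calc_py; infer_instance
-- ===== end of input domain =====

-- B replaces A's single stateful accumulator loop by an index-collecting pass plus a
-- pairwise-gap maximum pass (objective: simpler).

-- ===== PORT A =====
-- state = (count, find, find_flg), exactly A's three loop variables
def calcStep (s : Int × Int × Int) (i : Int) : Int × Int × Int :=
  match s with
  | (count, find, find_flg) =>
    if i == 1 then
      ((if find_flg == 1 then (if count < find then find else count) else count), 0, 1)
    else
      (count, (if find_flg == 1 then find + 1 else find), find_flg)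

def calc_py (res : List Int) : Int :=
  (res.foldl calcStep (0, 0, 0)).1

-- ===== PORT B =====
def calc_py_alt (res : List Int) : Int :=
  let ones : List Int := ((PySem.List.enumerate res).filter (fun p => p.2 == 1)).map Prod.fst
  List.foldl (fun best ab => if ab.2 - ab.1 - 1 > best then ab.2 - ab.1 - 1 else best) 0
    (List.zip ones (PySem.List.slice ones (some 1) none))

-- ===== PRECONDITION & SPEC =====
def Spec_calc_py (res : List Int) (out : Int) : Prop := out = calc_py_alt res
instance (res : List Int) (out : Int) : Decidable (Spec_calc_py res out) := by unfold Spec_calc_py; infer_instance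

-- ===== CLAIM (what is proved, stated in full; the proofs are below) =====
def Claim_equal_calc_py : Prop := ∀ (res : List Int), Dom_calc_py res → Spec_calc_py res (calc_py res)

-- ===== LEMMAS AND PROOFS =====

-- proof-side helpers
def onesFrom (n : Int) : List Int → List Int
  | [] => []
  | x :: xs => if x = 1 then n :: onesFrom (n + 1) xs else onesFrom (n + 1) xs

def runsAux (f : Int) : List Int → List Int
  | [] => []
  | x :: xs => if x = 1 then f :: runsAux 0 xs else runsAux (f + 1) xs

def gapsOf (p : Int) : List Int → List Int
  | [] => []
  | i :: is => (i - p - 1) :: gapsOf i is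

theorem ones_eq (res : List Int) (n : Int) :
    ((PySem.List.enumerate res n).filter (fun p => p.2 == 1)).map Prod.fst = onesFrom n res := by
  induction res generalizing n with
  | nil => simp [PySem.List.enumerate, onesFrom]
  | cons x xs ih =>
    simp only [PySem.List.enumerate_cons, List.filter_cons, onesFrom]
    by_cases hx : x = 1
    · simp [hx, ih]
    · simp [hx, ih]

theorem runsAux_eq_gaps (l : List Int) (n p : Int) :
    runsAux (n - p - 1) l = gapsOf p (onesFrom n l) := by
  induction l generalizing n p with
  | nil => simp [runsAux, onesFrom, gapsOf]
  | cons x xs ih =>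
    by_cases hx : x = 1
    · subst hx
      have h0 : runsAux 0 xs = gapsOf n (onesFrom (n + 1) xs) := by
        have := ih (n + 1) n; simpa using this
      simp [runsAux, onesFrom, gapsOf, h0]
    · simp only [runsAux, onesFrom, hx]
      have := ih (n + 1) p
      have harith : n + 1 - p - 1 = n - p - 1 + 1 := by ring
      rw [harith] at this
      exact this

theorem foldA_flag (l : List Int) (c f : Int) :
    (l.foldl calcStep (c, f, 1)).1 =
      List.foldl (fun a b => if a < b then b else a) c (runsAux f l) := by
  induction l generalizing c f with
  | nil => simp [runsAux]
  | cons x xs ih =>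
    by_cases hx : x = 1
    · simp only [List.foldl_cons, calcStep, hx, runsAux]
      simpa using ih (if c < f then f else c) 0
    · simp only [List.foldl_cons, calcStep, runsAux, if_neg hx]
      have hb : (x == 1) = false := by simpa using hx
      simp only [hb, Bool.false_eq_true, if_false]
      exact ih c (f + 1)

theorem foldB_pairs (is : List Int) (p best : Int) :
    List.foldl (fun best ab => if ab.2 - ab.1 - 1 > best then ab.2 - ab.1 - 1 else best) best
      (List.zip (p :: is) is) =
    List.foldl (fun a b => if a < b then b else a) best (gapsOf p is) := by
  induction is generalizing p best with
  | nil => simp [gapsOf]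
  | cons i is ih =>
    simp only [List.zip_cons_cons, List.foldl_cons, gapsOf]
    exact ih i _

theorem main_eq (l : List Int) (n : Int) :
    (l.foldl calcStep (0, 0, 0)).1 =
      List.foldl (fun best ab => if ab.2 - ab.1 - 1 > best then ab.2 - ab.1 - 1 else best) 0
        (List.zip (onesFrom n l) (onesFrom n l).tail) := by
  induction l generalizing n with
  | nil => simp [onesFrom]
  | cons x xs ih =>
    by_cases hx : x = 1
    · subst hx
      simp only [List.foldl_cons, calcStep, onesFrom, beq_self_eq_true, if_pos,
        List.tail_cons]
      rw [foldA_flag, foldB_pairs]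
      have := runsAux_eq_gaps xs (n + 1) n
      have harith : n + 1 - n - 1 = (0 : Int) := by ring
      rw [harith] at this
      rw [this]
      norm_num
    · simp only [List.foldl_cons, calcStep, onesFrom, if_neg hx]
      have hb : (x == 1) = false := by simpa using hx
      simp only [hb, Bool.false_eq_true, if_false]
      exact ih (n + 1)

-- ===== VERDICT (by name: the statement is the Claim_ definition above) =====
theorem calc_py_spec : Claim_equal_calc_py := by
  intro res _
  show calc_py res = calc_py_alt res
  unfold calc_py calc_py_alt
  simp only [PySem.List.slice_from_one, ones_eq]
  exact main_eq res 0
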